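-- pv_equiv track=rewrite | github.com/Aditya12320/RedditUserPersonaGenerator | persona_template.py | _infer_goals
-- ===== SOURCE A (Python) =====
-- from typing import List, Dict, Tuple
--
-- def _infer_goals(items: List[Dict]) -> List[str]:
--     """Enhanced goal inference."""
--     goals = []
--     goal_keywords = {
--         'Career growth': ['promotion', 'career', 'job', 'work'],
--         'Education': ['degree', 'study', 'course', 'learn'],
--         'Relationships': ['friend', 'partner', 'relationship'],
--         'Financial': ['money', 'save', 'invest', 'rich']
--     }
--
--     for item in items:
--         text = item.get('text', '').lower()
--         for goal, keywords in goal_keywords.items():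
--             if any(kw in text for kw in keywords) and goal not in goals:
--                 goals.append(goal)
--
--     return goals or ["Unknown"]
-- ===== SOURCE B (Python) =====
-- from typing import List, Dict
--
-- GOAL_KEYWORDS = {
--     'Career growth': ['promotion', 'career', 'job', 'work'],
--     'Education': ['degree', 'study', 'course', 'learn'],
--     'Relationships': ['friend', 'partner', 'relationship'],
--     'Financial': ['money', 'save', 'invest', 'rich'],
-- }
--
--
-- def _matches(item, keywords):
--     text = item.get('text', '').lower()
--     return any(kw in text for kw in keywords)
--
--
-- def _infer_goals(items: List[Dict]) -> List[str]:
--     """Goal inference, stateless: goal g is emitted at the first item it matches."""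
--     goals = [goal
--              for i, item in enumerate(items)
--              for goal, kws in GOAL_KEYWORDS.items()
--              if _matches(item, kws) and not any(_matches(p, kws) for p in items[:i])]
--     return goals or ["Unknown"]
-- ===== Notes on version B (the rewrite author's own statement) =====
-- stated objective: alternative
-- what changed: Replaces A's stateful accumulator with membership-based dedup ('goal not in goals') by a stateless comprehension that emits a goal exactly at the first item whose text matches it (a lookback over items[:i] instead of mutable state).
import Mathlib
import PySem

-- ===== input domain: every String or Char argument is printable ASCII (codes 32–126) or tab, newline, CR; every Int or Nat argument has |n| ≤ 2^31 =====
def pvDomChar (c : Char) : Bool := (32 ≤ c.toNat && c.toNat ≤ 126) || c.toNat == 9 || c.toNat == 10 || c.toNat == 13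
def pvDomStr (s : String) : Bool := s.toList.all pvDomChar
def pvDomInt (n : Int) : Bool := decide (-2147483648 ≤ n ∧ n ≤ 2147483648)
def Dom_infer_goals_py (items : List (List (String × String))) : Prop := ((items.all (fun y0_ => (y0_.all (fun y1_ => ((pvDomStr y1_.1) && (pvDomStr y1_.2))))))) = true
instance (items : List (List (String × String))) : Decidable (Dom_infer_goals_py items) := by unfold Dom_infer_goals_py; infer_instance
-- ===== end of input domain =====

-- B replaces A's stateful dedup (append if goal not already in the output) by a stateless
-- comprehension emitting each goal at the first item matching it (objective: alternative decomposition).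

-- the goal_keywords dict literal, shared by both ports as data
def pvGoalKeywords : List (String × List String) :=
  [("Career growth", ["promotion", "career", "job", "work"]),
   ("Education", ["degree", "study", "course", "learn"]),
   ("Relationships", ["friend", "partner", "relationship"]),
   ("Financial", ["money", "save", "invest", "rich"])]

-- ===== PORT A =====
def infer_goals_py (items : List (List (String × String))) : List String :=
  let goals : List String :=
    items.foldl (fun goals item =>
      let text := PySem.Str.lower (PySem.Dict.getD ⟨item⟩ "text" "")
      pvGoalKeywords.foldl (fun gs gk =>
        if (gk.2.any (fun kw => PySem.Str.isIn kw text)) && !(gs.contains gk.1)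
        then gs ++ [gk.1] else gs) goals) []
  if goals = [] then ["Unknown"] else goals

-- ===== PORT B =====
-- Source B's helper _matches
def pvMatches (item : List (String × String)) (keywords : List String) : Bool :=
  let text := PySem.Str.lower (PySem.Dict.getD ⟨item⟩ "text" "")
  keywords.any (fun kw => PySem.Str.isIn kw text)

def infer_goals_py_alt (items : List (List (String × String))) : List String :=
  let goals : List String :=
    (PySem.List.enumerate items).flatMap (fun p =>
      (pvGoalKeywords.filter (fun gk =>
          pvMatches p.2 gk.2 &&
          !((PySem.List.slice items none (some p.1)).any (fun q => pvMatches q gk.2)))).map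
        (fun gk => gk.1))
  if goals = [] then ["Unknown"] else goals

-- ===== PRECONDITION & SPEC =====
def Spec_infer_goals_py (items : List (List (String × String))) (out : List String) : Prop := out = infer_goals_py_alt items
instance (items : List (List (String × String))) (out : List String) : Decidable (Spec_infer_goals_py items out) := by unfold Spec_infer_goals_py; infer_instance

-- ===== CLAIM (what is proved, stated in full; the proofs are below) =====
def Claim_equal_infer_goals_py : Prop := ∀ (items : List (List (String × String))), Dom_infer_goals_py items → Spec_infer_goals_py items (infer_goals_py items)

-- ===== LEMMAS AND PROOFS =====

-- the goals emitted at one item, given the prefix of earlier items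
def pvBlock (pre : List (List (String × String))) (x : List (String × String)) : List String :=
  (pvGoalKeywords.filter (fun gk =>
      pvMatches x gk.2 && !(pre.any (fun q => pvMatches q gk.2)))).map (fun gk => gk.1)

-- recursive form of B's flat list
def pvFlat (pre rest : List (List (String × String))) : List String :=
  match rest with
  | [] => []
  | x :: r => pvBlock pre x ++ pvFlat (pre ++ [x]) r

theorem pv_nodup_names : (pvGoalKeywords.map (fun gk => gk.1)).Nodup := by decide

-- membership in a filtered name list equals the filter condition (distinct names)
theorem pv_contains_filter_map (gks : List (String × List String)) (p : String × List String → Bool)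
    (gk : String × List String) (hnd : (gks.map (fun g => g.1)).Nodup) (hmem : gk ∈ gks) :
    ((gks.filter p).map (fun g => g.1)).contains gk.1 = p gk := by
  induction gks with
  | nil => cases hmem
  | cons hd tl ih =>
    simp only [List.map_cons, List.nodup_cons] at hnd
    rcases List.mem_cons.mp hmem with rfl | htl
    · have hno : ((tl.filter p).map (fun g => g.1)).contains gk.1 = false := by
        simp only [List.contains_eq_mem, decide_eq_false_iff_not, List.mem_map, List.mem_filter]
        rintro ⟨g, ⟨hg, _⟩, hEq⟩
        exact hnd.1 (hEq ▸ List.mem_map_of_mem hg)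
      by_cases hp : p gk = true
      · simp [hp]
      · simp only [Bool.not_eq_true] at hp
        rw [List.filter_cons, if_neg (by simp [hp]), hno, hp]
    · have hne : gk.1 ≠ hd.1 := by
        intro h
        exact hnd.1 (h ▸ List.mem_map_of_mem htl)
      have hbe : (gk.1 == hd.1) = false := beq_eq_false_iff_ne.mpr hne
      by_cases hp : p hd = true
      · rw [List.filter_cons, if_pos hp, List.map_cons, List.contains_cons, hbe,
           ih hnd.2 htl]
        simp
      · simp only [Bool.not_eq_true] at hp
        rw [List.filter_cons, if_neg (by simp [hp])]
        exact ih hnd.2 htl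

-- A's inner loop over the goal table appends exactly the filtered goal names
theorem pv_inner (gks : List (String × List String)) (x : List (String × String))
    (pre : List (List (String × String))) :
    ∀ (acc : List String), (gks.map (fun g => g.1)).Nodup →
    (∀ gk ∈ gks, acc.contains gk.1 = pre.any (fun q => pvMatches q gk.2)) →
    gks.foldl (fun gs gk =>
        if (gk.2.any (fun kw => PySem.Str.isIn kw (PySem.Str.lower (PySem.Dict.getD ⟨x⟩ "text" "")))) && !(gs.contains gk.1)
        then gs ++ [gk.1] else gs) acc
      = acc ++ (gks.filter (fun gk =>
          pvMatches x gk.2 && !(pre.any (fun q => pvMatches q gk.2)))).map (fun gk => gk.1) := by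
  induction gks with
  | nil => intro acc _ _; simp
  | cons hd tl ih =>
    intro acc hnd h
    simp only [List.map_cons, List.nodup_cons] at hnd
    have hhd : acc.contains hd.1 = pre.any (fun q => pvMatches q hd.2) :=
      h hd (List.mem_cons_self ..)
    have hmx : (hd.2.any (fun kw => PySem.Str.isIn kw (PySem.Str.lower (PySem.Dict.getD ⟨x⟩ "text" "")))) = pvMatches x hd.2 := rfl
    simp only [List.foldl_cons]
    cases hc : (pvMatches x hd.2 && !(pre.any (fun q => pvMatches q hd.2))) with
    | true =>
      obtain ⟨hb, hcp⟩ := (Bool.and_eq_true _ _).mp hc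
      have htl : ∀ gk ∈ tl, (acc ++ [hd.1]).contains gk.1 = pre.any (fun q => pvMatches q gk.2) := by
        intro gk hgk
        have hne : gk.1 ≠ hd.1 := by
          intro hEq
          exact hnd.1 (hEq ▸ List.mem_map_of_mem hgk)
        have hbe : (gk.1 == hd.1) = false := beq_eq_false_iff_ne.mpr hne
        rw [List.contains_append, h gk (List.mem_cons_of_mem _ hgk)]
        simp
        intro hEq
        exact absurd hEq hne
      rw [if_pos (by rw [hmx, hhd]; exact hc)]
      rw [List.filter_cons, if_pos hc, List.map_cons]
      rw [ih (acc ++ [hd.1]) hnd.2 htl]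
      simp
    | false =>
      rw [if_neg (by rw [hmx, hhd, hc]; exact Bool.false_ne_true)]
      rw [List.filter_cons, if_neg (by rw [hc]; exact Bool.false_ne_true)]
      exact ih acc hnd.2 (fun gk hgk => h gk (List.mem_cons_of_mem _ hgk))

-- A's outer loop computes pvFlat
theorem pv_aside (rest : List (List (String × String))) :
    ∀ (pre : List (List (String × String))) (acc : List String),
    (∀ gk ∈ pvGoalKeywords, acc.contains gk.1 = pre.any (fun q => pvMatches q gk.2)) →
    rest.foldl (fun goals item =>
      pvGoalKeywords.foldl (fun gs gk =>
        if (gk.2.any (fun kw => PySem.Str.isIn kw (PySem.Str.lower (PySem.Dict.getD ⟨item⟩ "text" "")))) && !(gs.contains gk.1)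
        then gs ++ [gk.1] else gs) goals) acc
      = acc ++ pvFlat pre rest := by
  induction rest with
  | nil => intro pre acc _; simp [pvFlat]
  | cons x r ih =>
    intro pre acc h
    simp only [List.foldl_cons, pvFlat]
    rw [pv_inner pvGoalKeywords x pre acc pv_nodup_names h]
    rw [ih (pre ++ [x]) _ (by
      intro gk hgk
      rw [List.contains_append, h gk hgk,
          pv_contains_filter_map pvGoalKeywords _ gk pv_nodup_names hgk]
      cases hb : pvMatches x gk.2 <;> cases hcpre : pre.any (fun q => pvMatches q gk.2) <;>
        simp [List.any_append, hb, hcpre])]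
    simp [pvBlock]

-- B's enumerate/slice comprehension computes pvFlat
theorem pv_bside (rest : List (List (String × String))) :
    ∀ (pre : List (List (String × String))),
    (PySem.List.enumerate rest (pre.length : Int)).flatMap (fun p =>
      (pvGoalKeywords.filter (fun gk =>
          pvMatches p.2 gk.2 &&
          !((PySem.List.slice (pre ++ rest) none (some p.1)).any (fun q => pvMatches q gk.2)))).map
        (fun gk => gk.1))
      = pvFlat pre rest := by
  induction rest with
  | nil => intro pre; simp [PySem.List.enumerate_nil, pvFlat]
  | cons x r ih =>
    intro pre
    rw [PySem.List.enumerate_cons]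
    simp only [List.flatMap_cons]
    have hs : PySem.List.slice (pre ++ x :: r) none (some (pre.length : Int)) = pre := by
      rw [PySem.List.slice_to _ (by positivity)]
      simp
    have harr : pre ++ x :: r = (pre ++ [x]) ++ r := by simp
    have hlen : (pre.length : Int) + 1 = ((pre ++ [x]).length : Int) := by
      simp [List.length_append]
    rw [hs, harr, hlen, ih (pre ++ [x])]
    rfl

-- ===== VERDICT (by name: the statement is the Claim_ definition above) =====
theorem infer_goals_py_spec : Claim_equal_infer_goals_py := by
  intro items _
  have hA := pv_aside items [] [] (by intro gk _; rfl)
  simp only [List.nil_append] at hA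
  have hB := pv_bside items []
  simp only [List.nil_append, List.length_nil, Nat.cast_zero] at hB
  unfold Spec_infer_goals_py
  simp only [infer_goals_py, infer_goals_py_alt, hA, hB]
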